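-- pv_equiv track=rewrite | github.com/aimed-lab/mondrian-web | scripts/compute_hierarchical_embeddings.py | find_nearest_ancestor_at_layer
-- ===== SOURCE A (Python) =====
-- def find_nearest_ancestor_at_layer(go_id, target_layer, child_to_parents, go_layers, visited=None):
--     """
--     BFS up the hierarchy to find the nearest ancestor(s) at the given layer.
--     Returns a list of ancestor IDs at that layer.
--     """
--     if visited is None:
--         visited = set()
--     if go_id in visited:
--         return []
--     visited.add(go_id)
--
--     results = []
--     parents = child_to_parents.get(go_id, set())
--     for p in parents:
--         p_layer = go_layers.get(p, 0)
--         if p_layer == target_layer: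
--             results.append(p)
--         elif p_layer > 0 and p_layer < target_layer:
--             # This parent is at a layer between our term and target — keep searching
--             results.extend(
--                 find_nearest_ancestor_at_layer(p, target_layer, child_to_parents, go_layers, visited)
--             )
--         elif p_layer == 0:
--             # Unknown layer, keep searching
--             results.extend(
--                 find_nearest_ancestor_at_layer(p, target_layer, child_to_parents, go_layers, visited)
--             )
--     return results
-- ===== SOURCE B (Python) =====
-- def find_nearest_ancestor_at_layer(go_id, target_layer, child_to_parents, go_layers, visited=None):
--     """
--     Iterative DFS with an explicit work stack of tagged entries instead of recursion.
--     Same results (value, order, duplicates) and same mutation of `visited` as the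
--     recursive version.
--     """
--     if visited is None:
--         visited = set()
--     results = []
--     stack = [('visit', go_id)]
--     while stack:
--         kind, node = stack.pop()
--         if kind == 'emit':
--             results.append(node)
--             continue
--         if node in visited:
--             continue
--         visited.add(node)
--         pending = []
--         for p in child_to_parents.get(node, set()):
--             p_layer = go_layers.get(p, 0)
--             if p_layer == target_layer:
--                 pending.append(('emit', p))
--             elif (0 < p_layer < target_layer) or p_layer == 0:
--                 pending.append(('visit', p))
--         stack.extend(reversed(pending))
--     return results
-- ===== Notes on version B (the rewrite author's own statement) =====
-- stated objective: alternative
-- what changed: A's recursive DFS (recurse into each non-target parent and splice the returned sublists together with extend) is replaced by an iterative while-loop over an explicit stack of tagged ('visit'/'emit') work items that appends results in place, with the same values, order, duplicates and the same mutation of the caller's visited set.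
import Mathlib
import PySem

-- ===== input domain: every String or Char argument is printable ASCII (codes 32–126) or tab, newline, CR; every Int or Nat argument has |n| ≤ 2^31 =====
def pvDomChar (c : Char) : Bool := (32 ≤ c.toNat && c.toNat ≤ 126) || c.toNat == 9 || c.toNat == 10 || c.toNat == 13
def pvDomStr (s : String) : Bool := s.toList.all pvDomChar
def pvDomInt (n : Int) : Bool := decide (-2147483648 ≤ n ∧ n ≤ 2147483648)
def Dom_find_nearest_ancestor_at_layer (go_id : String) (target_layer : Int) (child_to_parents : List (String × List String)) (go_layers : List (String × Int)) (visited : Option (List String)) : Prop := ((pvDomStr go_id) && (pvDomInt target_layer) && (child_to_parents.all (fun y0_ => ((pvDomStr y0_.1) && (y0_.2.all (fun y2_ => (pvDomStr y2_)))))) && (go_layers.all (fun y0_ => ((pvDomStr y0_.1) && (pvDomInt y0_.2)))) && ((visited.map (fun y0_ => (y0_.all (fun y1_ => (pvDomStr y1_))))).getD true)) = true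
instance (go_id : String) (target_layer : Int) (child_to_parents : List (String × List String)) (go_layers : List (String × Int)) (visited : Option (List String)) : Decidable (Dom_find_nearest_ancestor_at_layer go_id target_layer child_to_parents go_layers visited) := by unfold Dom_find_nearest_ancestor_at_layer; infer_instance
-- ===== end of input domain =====

-- B replaces A's recursive DFS by an iterative loop over an explicit stack of tagged
-- ('visit'/'emit') work items (objective: alternative — same values, same order,
-- same duplicates). Both A and B mutate the caller-supplied `visited` set identically;
-- the equivalence proved here is about the RETURN value.

-- Shared termination infrastructure: both ports recurse/loop while the `visited` set
-- grows inside the finite universe of strings that can ever be visited.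

-- all parent strings occurring anywhere in the dict's values
def pvFlat (c2p : List (String × List String)) : List String :=
  (c2p.map Prod.snd).flatten

-- number of not-yet-visited elements of the universe P (termination measure)
def pvMu (P : List String) (v : PySem.Set String) : Nat :=
  P.countP (fun x => !(PySem.Set.contains v x))

theorem pvContains_add_self (v : PySem.Set String) (x : String) :
    PySem.Set.contains (PySem.Set.add v x) x = true := by
  rw [PySem.Set.contains_iff]
  exact (PySem.Set.mem_add v x x).mpr (Or.inr rfl)

theorem pvContains_add_of_contains (v : PySem.Set String) (x y : String)
    (h : PySem.Set.contains v y = true) :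
    PySem.Set.contains (PySem.Set.add v x) y = true := by
  rw [PySem.Set.contains_iff] at h ⊢
  exact (PySem.Set.mem_add v x y).mpr (Or.inl h)

theorem pvMu_mono (P : List String) (v w : PySem.Set String)
    (h : ∀ y, PySem.Set.contains v y = true → PySem.Set.contains w y = true) :
    pvMu P w ≤ pvMu P v := by
  apply List.countP_mono_left
  intro x _ hx
  simp only [Bool.not_eq_true'] at hx ⊢
  cases hvx : PySem.Set.contains v x with
  | false => rfl
  | true => rw [h x hvx] at hx; exact Bool.noConfusion hx

theorem pvMu_add_lt (P : List String) (v : PySem.Set String) (x : String)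
    (hx : x ∈ P) (hv : PySem.Set.contains v x = false) :
    pvMu P (PySem.Set.add v x) < pvMu P v := by
  obtain ⟨l₁, l₂, rfl⟩ := List.append_of_mem hx
  have hmono : ∀ l : List String,
      List.countP (fun y => !(PySem.Set.contains (PySem.Set.add v x) y)) l ≤
      List.countP (fun y => !(PySem.Set.contains v y)) l := by
    intro l
    apply List.countP_mono_left
    intro y _ hy
    simp only [Bool.not_eq_true'] at hy ⊢
    cases hvy : PySem.Set.contains v y with
    | false => rfl
    | true => rw [pvContains_add_of_contains v x y hvy] at hy; exact Bool.noConfusion hy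
  unfold pvMu
  have h1 := hmono l₁
  have h2 := hmono l₂
  simp only [List.countP_append, List.countP_cons, pvContains_add_self, hv,
    Bool.not_true, Bool.not_false, Bool.false_eq_true, if_false, if_true]
  omega

-- membership in a first-match dict lookup lands in pvFlat
theorem pvMem_getD_flat (d : List (String × List String)) (k p : String)
    (h : p ∈ PySem.Dict.getD (PySem.Dict.mk d) k []) : p ∈ pvFlat d := by
  induction d with
  | nil => simp [PySem.Dict.getD, PySem.Dict.get?] at h
  | cons hd tl ih =>
    by_cases hk : hd.1 == k
    · have : PySem.Dict.getD (PySem.Dict.mk (hd :: tl)) k [] = hd.2 := by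
        simp [PySem.Dict.getD, PySem.Dict.get?, hk]
      rw [this] at h
      exact List.mem_flatten.mpr ⟨hd.2, by simp, h⟩
    · have : PySem.Dict.getD (PySem.Dict.mk (hd :: tl)) k [] =
          PySem.Dict.getD (PySem.Dict.mk tl) k [] := by
        simp [PySem.Dict.getD, PySem.Dict.get?, hk]
      rw [this] at h
      have := ih h
      unfold pvFlat at this ⊢
      simp only [List.map_cons, List.flatten_cons, List.mem_append]
      exact Or.inr this

-- ===== PORT A =====
-- A is a recursive DFS; ported as a mutual well-founded recursion (node / parents-list),
-- threading `visited` and carrying, as the subtype part, the fact that `visited` only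
-- grows (needed for termination).  The universe P with its closure hypotheses is proof
-- data only; the computed values are exactly A's.
mutual
def pvWalkA (target_layer : Int) (child_to_parents : List (String × List String))
    (go_layers : List (String × Int)) (P : List String)
    (hP : ∀ s, s ∈ pvFlat child_to_parents → s ∈ P)
    (go_id : String) (hgo : go_id ∈ P) (v : PySem.Set String) :
    {r : List String × PySem.Set String //
      ∀ y, PySem.Set.contains v y = true → PySem.Set.contains r.2 y = true} :=
  if hmem : PySem.Set.contains v go_id = true then
    ⟨([], v), fun _ hy => hy⟩
  else
    let r := pvWalkAList target_layer child_to_parents go_layers P hP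
      (PySem.Dict.getD (PySem.Dict.mk child_to_parents) go_id [])
      (fun p hp => hP p (pvMem_getD_flat child_to_parents go_id p hp))
      (PySem.Set.add v go_id)
    ⟨r.val, fun y hy => r.property y (pvContains_add_of_contains v go_id y hy)⟩
termination_by (pvMu P v, 0)
decreasing_by
  exact Prod.Lex.left _ _ (pvMu_add_lt P v go_id hgo (by simpa using hmem))

def pvWalkAList (target_layer : Int) (child_to_parents : List (String × List String))
    (go_layers : List (String × Int)) (P : List String)
    (hP : ∀ s, s ∈ pvFlat child_to_parents → s ∈ P)
    (ps : List String) (hps : ∀ p ∈ ps, p ∈ P) (v : PySem.Set String) :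
    {r : List String × PySem.Set String //
      ∀ y, PySem.Set.contains v y = true → PySem.Set.contains r.2 y = true} :=
  match ps, hps with
  | [], _ => ⟨([], v), fun _ hy => hy⟩
  | p :: rest, hps =>
    let p_layer := PySem.Dict.getD (PySem.Dict.mk go_layers) p 0
    if p_layer = target_layer then
      let r := pvWalkAList target_layer child_to_parents go_layers P hP rest
        (fun q hq => hps q (List.mem_cons_of_mem _ hq)) v
      ⟨(p :: r.val.1, r.val.2), r.property⟩
    else if 0 < p_layer ∧ p_layer < target_layer then
      let r1 := pvWalkA target_layer child_to_parents go_layers P hP p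
        (hps p (List.mem_cons_self)) v
      let r2 := pvWalkAList target_layer child_to_parents go_layers P hP rest
        (fun q hq => hps q (List.mem_cons_of_mem _ hq)) r1.val.2
      ⟨(r1.val.1 ++ r2.val.1, r2.val.2), fun y hy => r2.property y (r1.property y hy)⟩
    else if p_layer = 0 then
      let r1 := pvWalkA target_layer child_to_parents go_layers P hP p
        (hps p (List.mem_cons_self)) v
      let r2 := pvWalkAList target_layer child_to_parents go_layers P hP rest
        (fun q hq => hps q (List.mem_cons_of_mem _ hq)) r1.val.2
      ⟨(r1.val.1 ++ r2.val.1, r2.val.2), fun y hy => r2.property y (r1.property y hy)⟩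
    else
      pvWalkAList target_layer child_to_parents go_layers P hP rest
        (fun q hq => hps q (List.mem_cons_of_mem _ hq)) v
termination_by (pvMu P v, ps.length + 1)
decreasing_by
  · exact Prod.Lex.right _ (by simp)
  · exact Prod.Lex.right _ (by simp)
  · rcases lt_or_eq_of_le (pvMu_mono P v r1.val.2 r1.property) with h | h
    · exact Prod.Lex.left _ _ h
    · rw [h]; exact Prod.Lex.right _ (by simp)
  · exact Prod.Lex.right _ (by simp)
  · rcases lt_or_eq_of_le (pvMu_mono P v r1.val.2 r1.property) with h | h
    · exact Prod.Lex.left _ _ h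
    · rw [h]; exact Prod.Lex.right _ (by simp)
  · exact Prod.Lex.right _ (by simp)
end

def find_nearest_ancestor_at_layer (go_id : String) (target_layer : Int)
    (child_to_parents : List (String × List String)) (go_layers : List (String × Int))
    (visited : Option (List String)) : List String :=
  let v0 : PySem.Set String := match visited with
    | none => PySem.Set.empty
    | some l => PySem.Set.ofList l
  (pvWalkA target_layer child_to_parents go_layers (go_id :: pvFlat child_to_parents)
    (fun s hs => List.mem_cons_of_mem _ hs) go_id (List.mem_cons_self) v0).val.1

-- ===== PORT B =====
-- B's work items: ('visit', node) / ('emit', node)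
inductive PvTask where
  | visit : String → PvTask
  | emit : String → PvTask
deriving DecidableEq, Repr

-- the tagged items a popped node pushes, top of stack first (Python pushes them reversed)
def pvTasksOf (target_layer : Int) (go_layers : List (String × Int))
    (ps : List String) : List PvTask :=
  ps.foldr (fun p acc =>
    let p_layer := PySem.Dict.getD (PySem.Dict.mk go_layers) p 0
    if p_layer = target_layer then PvTask.emit p :: acc
    else if (0 < p_layer ∧ p_layer < target_layer) ∨ p_layer = 0 then PvTask.visit p :: acc
    else acc) []

theorem pvVisit_mem_tasksOf (target_layer : Int) (go_layers : List (String × Int))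
    (ps : List String) (s : String)
    (h : PvTask.visit s ∈ pvTasksOf target_layer go_layers ps) : s ∈ ps := by
  induction ps with
  | nil => simp [pvTasksOf] at h
  | cons p rest ih =>
    simp only [pvTasksOf, List.foldr_cons] at h
    split at h
    · rcases List.mem_cons.mp h with h' | h'
      · exact absurd h' (by simp)
      · exact List.mem_cons_of_mem _ (ih h')
    · split at h
      · rcases List.mem_cons.mp h with h' | h'
        · exact (PvTask.visit.injEq _ _ ▸ h') ▸ List.mem_cons_self
        · exact List.mem_cons_of_mem _ (ih h')
      · exact List.mem_cons_of_mem _ (ih h)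

-- B's while loop over the explicit stack (head = top of stack)
def pvLoopB (target_layer : Int) (child_to_parents : List (String × List String))
    (go_layers : List (String × Int)) (P : List String)
    (hP : ∀ s, s ∈ pvFlat child_to_parents → s ∈ P)
    (stack : List PvTask) (hstack : ∀ s, PvTask.visit s ∈ stack → s ∈ P)
    (v : PySem.Set String) (results : List String) : List String :=
  match stack with
  | [] => results
  | PvTask.emit p :: rest =>
    pvLoopB target_layer child_to_parents go_layers P hP rest
      (fun s hs => hstack s (List.mem_cons_of_mem _ hs)) v (results ++ [p])
  | PvTask.visit n :: rest =>
    if hmem : PySem.Set.contains v n = true then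
      pvLoopB target_layer child_to_parents go_layers P hP rest
        (fun s hs => hstack s (List.mem_cons_of_mem _ hs)) v results
    else
      pvLoopB target_layer child_to_parents go_layers P hP
        (pvTasksOf target_layer go_layers
          (PySem.Dict.getD (PySem.Dict.mk child_to_parents) n []) ++ rest)
        (fun s hs => by
          rcases List.mem_append.mp hs with h' | h'
          · exact hP s (pvMem_getD_flat child_to_parents n s
              (pvVisit_mem_tasksOf _ _ _ _ h'))
          · exact hstack s (List.mem_cons_of_mem _ h'))
        (PySem.Set.add v n) results
termination_by (pvMu P v, stack.length)
decreasing_by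
  · exact Prod.Lex.right _ (by simp)
  · exact Prod.Lex.right _ (by simp)
  · exact Prod.Lex.left _ _ (pvMu_add_lt P v n
      (hstack n (List.mem_cons_self)) (by simpa using hmem))

def find_nearest_ancestor_at_layer_alt (go_id : String) (target_layer : Int)
    (child_to_parents : List (String × List String)) (go_layers : List (String × Int))
    (visited : Option (List String)) : List String :=
  let v0 : PySem.Set String := match visited with
    | none => PySem.Set.empty
    | some l => PySem.Set.ofList l
  pvLoopB target_layer child_to_parents go_layers (go_id :: pvFlat child_to_parents)
    (fun s hs => List.mem_cons_of_mem _ hs)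
    [PvTask.visit go_id]
    (fun s hs => by
      rcases List.mem_cons.mp hs with h' | h'
      · exact (PvTask.visit.injEq _ _ ▸ h') ▸ List.mem_cons_self
      · exact absurd h' (by simp))
    v0 []

-- ===== PRECONDITION & SPEC =====
def Spec_find_nearest_ancestor_at_layer (go_id : String) (target_layer : Int) (child_to_parents : List (String × List String)) (go_layers : List (String × Int)) (visited : Option (List String)) (out : List String) : Prop := out = find_nearest_ancestor_at_layer_alt go_id target_layer child_to_parents go_layers visited
instance (go_id : String) (target_layer : Int) (child_to_parents : List (String × List String)) (go_layers : List (String × Int)) (visited : Option (List String)) (out : List String) : Decidable (Spec_find_nearest_ancestor_at_layer go_id target_layer child_to_parents go_layers visited out) := by unfold Spec_find_nearest_ancestor_at_layer; infer_instance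

-- ===== CLAIM (what is proved, stated in full; the proofs are below) =====
def Claim_equal_find_nearest_ancestor_at_layer : Prop := ∀ (go_id : String) (target_layer : Int) (child_to_parents : List (String × List String)) (go_layers : List (String × Int)) (visited : Option (List String)), Dom_find_nearest_ancestor_at_layer go_id target_layer child_to_parents go_layers visited → Spec_find_nearest_ancestor_at_layer go_id target_layer child_to_parents go_layers visited (find_nearest_ancestor_at_layer go_id target_layer child_to_parents go_layers visited)

-- ===== LEMMAS AND PROOFS =====

theorem pvLoopB_nil (target_layer : Int) (child_to_parents : List (String × List String))
    (go_layers : List (String × Int)) (P : List String)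
    (hP : ∀ s, s ∈ pvFlat child_to_parents → s ∈ P)
    (h : ∀ s, PvTask.visit s ∈ ([] : List PvTask) → s ∈ P)
    (v : PySem.Set String) (res : List String) :
    pvLoopB target_layer child_to_parents go_layers P hP [] h v res = res := by
  rw [pvLoopB]

theorem pvLoopB_emit (target_layer : Int) (child_to_parents : List (String × List String))
    (go_layers : List (String × Int)) (P : List String)
    (hP : ∀ s, s ∈ pvFlat child_to_parents → s ∈ P)
    (p : String) (rest : List PvTask)
    (h : ∀ s, PvTask.visit s ∈ PvTask.emit p :: rest → s ∈ P)
    (v : PySem.Set String) (res : List String) :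
    pvLoopB target_layer child_to_parents go_layers P hP (PvTask.emit p :: rest) h v res
    = pvLoopB target_layer child_to_parents go_layers P hP rest
        (fun s hs => h s (List.mem_cons_of_mem _ hs)) v (res ++ [p]) := by
  rw [pvLoopB]

theorem pvLoopB_visit_mem (target_layer : Int) (child_to_parents : List (String × List String))
    (go_layers : List (String × Int)) (P : List String)
    (hP : ∀ s, s ∈ pvFlat child_to_parents → s ∈ P)
    (n : String) (rest : List PvTask)
    (h : ∀ s, PvTask.visit s ∈ PvTask.visit n :: rest → s ∈ P)
    (v : PySem.Set String) (res : List String)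
    (hmem : PySem.Set.contains v n = true) :
    pvLoopB target_layer child_to_parents go_layers P hP (PvTask.visit n :: rest) h v res
    = pvLoopB target_layer child_to_parents go_layers P hP rest
        (fun s hs => h s (List.mem_cons_of_mem _ hs)) v res := by
  rw [pvLoopB, dif_pos hmem]

theorem pvLoopB_visit_new (target_layer : Int) (child_to_parents : List (String × List String))
    (go_layers : List (String × Int)) (P : List String)
    (hP : ∀ s, s ∈ pvFlat child_to_parents → s ∈ P)
    (n : String) (rest : List PvTask)
    (h : ∀ s, PvTask.visit s ∈ PvTask.visit n :: rest → s ∈ P)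
    (v : PySem.Set String) (res : List String)
    (hmem : PySem.Set.contains v n = false) :
    pvLoopB target_layer child_to_parents go_layers P hP (PvTask.visit n :: rest) h v res
    = pvLoopB target_layer child_to_parents go_layers P hP
        (pvTasksOf target_layer go_layers
          (PySem.Dict.getD (PySem.Dict.mk child_to_parents) n []) ++ rest)
        (fun s hs => by
          rcases List.mem_append.mp hs with h' | h'
          · exact hP s (pvMem_getD_flat child_to_parents n s
              (pvVisit_mem_tasksOf _ _ _ _ h'))
          · exact h s (List.mem_cons_of_mem _ h'))
        (PySem.Set.add v n) res := by
  rw [pvLoopB, dif_neg (by rw [hmem]; simp)]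

theorem pvWalkA_mem (target_layer : Int) (child_to_parents : List (String × List String))
    (go_layers : List (String × Int)) (P : List String)
    (hP : ∀ s, s ∈ pvFlat child_to_parents → s ∈ P)
    (go_id : String) (hgo : go_id ∈ P) (v : PySem.Set String)
    (hmem : PySem.Set.contains v go_id = true) :
    (pvWalkA target_layer child_to_parents go_layers P hP go_id hgo v).val = ([], v) := by
  rw [pvWalkA, dif_pos hmem]

theorem pvWalkA_new (target_layer : Int) (child_to_parents : List (String × List String))
    (go_layers : List (String × Int)) (P : List String)
    (hP : ∀ s, s ∈ pvFlat child_to_parents → s ∈ P)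
    (go_id : String) (hgo : go_id ∈ P) (v : PySem.Set String)
    (hmem : PySem.Set.contains v go_id = false) :
    (pvWalkA target_layer child_to_parents go_layers P hP go_id hgo v).val
    = (pvWalkAList target_layer child_to_parents go_layers P hP
        (PySem.Dict.getD (PySem.Dict.mk child_to_parents) go_id [])
        (fun p hp => hP p (pvMem_getD_flat child_to_parents go_id p hp))
        (PySem.Set.add v go_id)).val := by
  rw [pvWalkA, dif_neg (by rw [hmem]; simp)]

theorem pvTasksOf_cons (target_layer : Int) (go_layers : List (String × Int))
    (p : String) (rest : List String) :
    pvTasksOf target_layer go_layers (p :: rest) =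
    (if PySem.Dict.getD (PySem.Dict.mk go_layers) p 0 = target_layer then
      PvTask.emit p :: pvTasksOf target_layer go_layers rest
     else if (0 < PySem.Dict.getD (PySem.Dict.mk go_layers) p 0 ∧
              PySem.Dict.getD (PySem.Dict.mk go_layers) p 0 < target_layer) ∨
             PySem.Dict.getD (PySem.Dict.mk go_layers) p 0 = 0 then
      PvTask.visit p :: pvTasksOf target_layer go_layers rest
     else pvTasksOf target_layer go_layers rest) := rfl

-- Main simulation lemma: running B's loop on the tasks generated from a parents list ps,
-- stacked above `stack`, equals first computing A's recursive walk over ps and then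
-- continuing B's loop on `stack` with the updated visited set and the results appended.
theorem pvLoopB_tasks (target_layer : Int) (child_to_parents : List (String × List String))
    (go_layers : List (String × Int)) (P : List String)
    (hP : ∀ s, s ∈ pvFlat child_to_parents → s ∈ P) (k : Nat) :
    ∀ (ps : List String) (hps : ∀ p ∈ ps, p ∈ P) (v : PySem.Set String),
      pvMu P v ≤ k →
      ∀ (stack : List PvTask) (hstack : ∀ s, PvTask.visit s ∈ stack → s ∈ P)
        (results : List String),
      pvLoopB target_layer child_to_parents go_layers P hP
        (pvTasksOf target_layer go_layers ps ++ stack)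
        (fun s hs => by
          rcases List.mem_append.mp hs with h' | h'
          · exact hps s (pvVisit_mem_tasksOf _ _ _ _ h')
          · exact hstack s h') v results
      = pvLoopB target_layer child_to_parents go_layers P hP stack hstack
          (pvWalkAList target_layer child_to_parents go_layers P hP ps hps v).val.2
          (results ++
            (pvWalkAList target_layer child_to_parents go_layers P hP ps hps v).val.1) := by
  induction k using Nat.strong_induction_on with
  | _ k ihk =>
  intro ps
  induction ps with
  | nil =>
    intro hps v hk stack hstack results
    simp [pvTasksOf, pvWalkAList]
  | cons p rest ihrest =>
    intro hps v hk stack hstack results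
    have hpP : p ∈ P := hps p List.mem_cons_self
    have hrest : ∀ q ∈ rest, q ∈ P := fun q hq => hps q (List.mem_cons_of_mem _ hq)
    rw [pvWalkAList]
    simp only [pvTasksOf_cons]
    by_cases h1 : PySem.Dict.getD (PySem.Dict.mk go_layers) p 0 = target_layer
    · simp only [if_pos h1, List.cons_append]
      rw [pvLoopB_emit, ihrest hrest v hk stack hstack (results ++ [p])]
      simp
    · by_cases h2a : 0 < PySem.Dict.getD (PySem.Dict.mk go_layers) p 0 ∧
          PySem.Dict.getD (PySem.Dict.mk go_layers) p 0 < target_layer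
      · simp only [if_neg h1, if_pos h2a, if_pos (Or.inl h2a : _ ∨ PySem.Dict.getD (PySem.Dict.mk go_layers) p 0 = 0), List.cons_append]
        cases hv : PySem.Set.contains v p with
        | true =>
          rw [pvLoopB_visit_mem _ _ _ _ _ _ _ _ _ _ hv,
              ihrest hrest v hk stack hstack results]
          rw [pvWalkA_mem target_layer child_to_parents go_layers P hP p (hps p List.mem_cons_self) v hv]; simp
        | false =>
          rw [pvLoopB_visit_new _ _ _ _ _ _ _ _ _ _ hv]
          have hlt : pvMu P (PySem.Set.add v p) < k :=
            lt_of_lt_of_le (pvMu_add_lt P v p hpP hv) hk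
          rw [ihk _ hlt (PySem.Dict.getD (PySem.Dict.mk child_to_parents) p [])
              (fun q hq => hP q (pvMem_getD_flat child_to_parents p q hq))
              (PySem.Set.add v p) le_rfl
              (pvTasksOf target_layer go_layers rest ++ stack)
              (fun s hs => by
                rcases List.mem_append.mp hs with h' | h'
                · exact hrest s (pvVisit_mem_tasksOf _ _ _ _ h')
                · exact hstack s h')
              results]
          have hsub : pvMu P (pvWalkAList target_layer child_to_parents go_layers P hP
              (PySem.Dict.getD (PySem.Dict.mk child_to_parents) p [])
              (fun q hq => hP q (pvMem_getD_flat child_to_parents p q hq))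
              (PySem.Set.add v p)).val.2 ≤ k := by
            refine le_trans (pvMu_mono P v _ (fun y hy => ?_)) hk
            exact (pvWalkAList target_layer child_to_parents go_layers P hP _ _ _).property
              y (pvContains_add_of_contains v p y hy)
          rw [ihrest hrest _ hsub stack hstack _]
          rw [pvWalkA_new target_layer child_to_parents go_layers P hP p (hps p List.mem_cons_self) v hv]; simp
      · by_cases h2b : PySem.Dict.getD (PySem.Dict.mk go_layers) p 0 = 0
        · simp only [if_neg h1, if_neg h2a, if_pos h2b, if_pos (Or.inr h2b : (0 < PySem.Dict.getD (PySem.Dict.mk go_layers) p 0 ∧ PySem.Dict.getD (PySem.Dict.mk go_layers) p 0 < target_layer) ∨ _), List.cons_append]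
          cases hv : PySem.Set.contains v p with
          | true =>
            rw [pvLoopB_visit_mem _ _ _ _ _ _ _ _ _ _ hv,
                ihrest hrest v hk stack hstack results]
            rw [pvWalkA_mem target_layer child_to_parents go_layers P hP p (hps p List.mem_cons_self) v hv]; simp
          | false =>
            rw [pvLoopB_visit_new _ _ _ _ _ _ _ _ _ _ hv]
            have hlt : pvMu P (PySem.Set.add v p) < k :=
              lt_of_lt_of_le (pvMu_add_lt P v p hpP hv) hk
            rw [ihk _ hlt (PySem.Dict.getD (PySem.Dict.mk child_to_parents) p [])
                (fun q hq => hP q (pvMem_getD_flat child_to_parents p q hq))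
                (PySem.Set.add v p) le_rfl
                (pvTasksOf target_layer go_layers rest ++ stack)
                (fun s hs => by
                  rcases List.mem_append.mp hs with h' | h'
                  · exact hrest s (pvVisit_mem_tasksOf _ _ _ _ h')
                  · exact hstack s h')
                results]
            have hsub : pvMu P (pvWalkAList target_layer child_to_parents go_layers P hP
                (PySem.Dict.getD (PySem.Dict.mk child_to_parents) p [])
                (fun q hq => hP q (pvMem_getD_flat child_to_parents p q hq))
                (PySem.Set.add v p)).val.2 ≤ k := by
              refine le_trans (pvMu_mono P v _ (fun y hy => ?_)) hk
              exact (pvWalkAList target_layer child_to_parents go_layers P hP _ _ _).property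
                y (pvContains_add_of_contains v p y hy)
            rw [ihrest hrest _ hsub stack hstack _]
            rw [pvWalkA_new target_layer child_to_parents go_layers P hP p (hps p List.mem_cons_self) v hv]; simp
        · have hnor : ¬((0 < PySem.Dict.getD (PySem.Dict.mk go_layers) p 0 ∧
              PySem.Dict.getD (PySem.Dict.mk go_layers) p 0 < target_layer) ∨
              PySem.Dict.getD (PySem.Dict.mk go_layers) p 0 = 0) := by tauto
          simp only [if_neg h1, if_neg h2a, if_neg h2b, if_neg hnor]
          exact ihrest hrest v hk stack hstack results

theorem pvWrap_eq (go_id : String) (target_layer : Int)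
    (child_to_parents : List (String × List String)) (go_layers : List (String × Int))
    (v0 : PySem.Set String) :
    (pvWalkA target_layer child_to_parents go_layers (go_id :: pvFlat child_to_parents)
      (fun s hs => List.mem_cons_of_mem _ hs) go_id List.mem_cons_self v0).val.1
    = pvLoopB target_layer child_to_parents go_layers (go_id :: pvFlat child_to_parents)
        (fun s hs => List.mem_cons_of_mem _ hs)
        [PvTask.visit go_id]
        (fun s hs => by
          rcases List.mem_cons.mp hs with h' | h'
          · exact (PvTask.visit.injEq _ _ ▸ h') ▸ List.mem_cons_self
          · exact absurd h' (by simp))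
        v0 [] := by
  cases hv : PySem.Set.contains v0 go_id with
  | true =>
    rw [pvWalkA_mem _ _ _ _ _ go_id List.mem_cons_self v0 hv,
        pvLoopB_visit_mem _ _ _ _ _ _ _ _ _ _ hv, pvLoopB_nil]
  | false =>
    rw [pvWalkA_new _ _ _ _ _ go_id List.mem_cons_self v0 hv,
        pvLoopB_visit_new _ _ _ _ _ _ _ _ _ _ hv,
        pvLoopB_tasks target_layer child_to_parents go_layers
          (go_id :: pvFlat child_to_parents) (fun s hs => List.mem_cons_of_mem _ hs)
          (pvMu (go_id :: pvFlat child_to_parents) (PySem.Set.add v0 go_id))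
          (PySem.Dict.getD (PySem.Dict.mk child_to_parents) go_id [])
          (fun p hp => List.mem_cons_of_mem _ (pvMem_getD_flat child_to_parents go_id p hp))
          (PySem.Set.add v0 go_id) le_rfl [] (fun s hs => by simp at hs) [],
        pvLoopB_nil]
    simp

theorem find_nearest_ancestor_at_layer_eq (go_id : String) (target_layer : Int)
    (child_to_parents : List (String × List String)) (go_layers : List (String × Int))
    (visited : Option (List String)) :
    find_nearest_ancestor_at_layer go_id target_layer child_to_parents go_layers visited
    = find_nearest_ancestor_at_layer_alt go_id target_layer child_to_parents go_layers visited := by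
  cases visited with
  | none =>
    exact pvWrap_eq go_id target_layer child_to_parents go_layers PySem.Set.empty
  | some l =>
    exact pvWrap_eq go_id target_layer child_to_parents go_layers (PySem.Set.ofList l)

-- ===== VERDICT (by name: the statement is the Claim_ definition above) =====
theorem find_nearest_ancestor_at_layer_spec : Claim_equal_find_nearest_ancestor_at_layer := by
  intro go_id target_layer child_to_parents go_layers visited _
  unfold Spec_find_nearest_ancestor_at_layer
  exact find_nearest_ancestor_at_layer_eq go_id target_layer child_to_parents go_layers visited
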